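-- pv_equiv track=rewrite | github.com/dacvs/aoc2023 | d21p2.py | distance_vertices
-- ===== SOURCE A (Python) =====
-- def distance_vertices(D):
--     """
--     Input D is a dict that maps each vertex to its distance from a certain vertex u0.
--     Return a dict that maps distance d to the set of vertices u with D[u] = d.
--     """
--     E = {}
--     for (x, y) in D:
--         d = D[x, y]
--         if not d in E:
--             E[d] = set()
--         E[d] |= {(x, y)}
--     return E
-- ===== SOURCE B (Python) =====
-- def distance_vertices(D):
--     """
--     Input D is a dict that maps each vertex to its distance from a certain vertex u0.
--     Return a dict that maps distance d to the set of vertices u with D[u] = d.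
--     """
--     return {d: {v for v, e in D.items() if e == d}
--             for d in dict.fromkeys(D.values())}
-- ===== Notes on version B (the rewrite author's own statement) =====
-- stated objective: alternative
-- what changed: Replaces the single-pass hash-bucketing loop (create-bucket-on-first-sight, then set-union each vertex in) by a two-pass grouping: first dedup the distance values in first-occurrence order, then build each group with one comprehension scanning the dict's items.
import Mathlib
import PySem

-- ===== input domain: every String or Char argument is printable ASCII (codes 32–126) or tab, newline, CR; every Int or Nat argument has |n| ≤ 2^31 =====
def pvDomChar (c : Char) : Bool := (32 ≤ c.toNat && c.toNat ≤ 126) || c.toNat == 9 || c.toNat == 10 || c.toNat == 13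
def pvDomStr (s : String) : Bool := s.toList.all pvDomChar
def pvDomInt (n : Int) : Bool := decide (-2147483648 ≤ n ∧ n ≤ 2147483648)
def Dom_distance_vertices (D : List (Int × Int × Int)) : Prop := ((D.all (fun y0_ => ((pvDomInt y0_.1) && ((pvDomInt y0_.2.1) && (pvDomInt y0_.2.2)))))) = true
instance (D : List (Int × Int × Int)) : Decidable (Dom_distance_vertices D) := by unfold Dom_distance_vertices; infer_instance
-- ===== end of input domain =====

-- B groups in two passes (dedup the distances, then one scan per distance) instead of A's
-- single-pass hash bucketing; equal output, alternative decomposition (no speed claim).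

-- ===== PORT A =====
-- d = D[x, y] : first-match lookup of key (x, y) in the association list D
def pvLookupA (D : List (Int × Int × Int)) (k : Int × Int) : Int :=
  (((D.find? (fun q => (q.1, q.2.1) == k)).map (fun q => q.2.2)).getD 0)

def distance_vertices (D : List (Int × Int × Int)) : List (Int × List (Int × Int)) :=
  (D.foldl
    (fun (E : PySem.Dict Int (PySem.Set (Int × Int))) p =>
      let d := pvLookupA D (p.1, p.2.1)
      let E' := if E.contains d then E else E.insert d PySem.Set.empty
      E'.insert d (PySem.Set.union (E'.getD d PySem.Set.empty)
                    (PySem.Set.ofList [(p.1, p.2.1)])))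
    PySem.Dict.empty).items

-- ===== PORT B =====
def distance_vertices_alt (D : List (Int × Int × Int)) : List (Int × List (Int × Int)) :=
  (PySem.List.dedup (D.map (fun p => p.2.2))).map
    (fun d => (d, PySem.Set.ofList
                    ((D.filter (fun p => p.2.2 == d)).map (fun p => (p.1, p.2.1)))))

-- ===== PRECONDITION & SPEC =====
-- The list stands for a Python dict keyed by the vertex (x, y): duplicate keys represent no
-- dict at all (CPython would have collapsed them on construction), so Pre_ requires the keys
-- to be pairwise distinct.
def Pre_distance_vertices (D : List (Int × Int × Int)) : Prop :=
  (D.map (fun p => (p.1, p.2.1))).Nodup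
instance (D : List (Int × Int × Int)) : Decidable (Pre_distance_vertices D) := by
  unfold Pre_distance_vertices; infer_instance

def pvWitness_distance_vertices : (List (Int × Int × Int)) :=
  [(0, 0, 1), (0, 1, 2), (1, 0, 1)]

def Spec_distance_vertices (D : List (Int × Int × Int)) (out : List (Int × List (Int × Int))) : Prop := out = distance_vertices_alt D
instance (D : List (Int × Int × Int)) (out : List (Int × List (Int × Int))) : Decidable (Spec_distance_vertices D out) := by unfold Spec_distance_vertices; infer_instance

-- ===== CLAIM (what is proved, stated in full; the proofs are below) =====
def Claim_equal_distance_vertices : Prop := ∀ (D : List (Int × Int × Int)), Dom_distance_vertices D → Pre_distance_vertices D → Spec_distance_vertices D (distance_vertices D)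

-- ===== LEMMAS AND PROOFS =====

-- the loop body of A with the lookup already resolved to the entry's own value
def pvStep (E : PySem.Dict Int (PySem.Set (Int × Int))) (p : Int × Int × Int) :
    PySem.Dict Int (PySem.Set (Int × Int)) :=
  let E' := if E.contains p.2.2 then E else E.insert p.2.2 PySem.Set.empty
  E'.insert p.2.2 (PySem.Set.union (E'.getD p.2.2 PySem.Set.empty)
                    (PySem.Set.ofList [(p.1, p.2.1)]))

theorem pvFind_eq (l : List (Int × Int × Int))
    (h : (l.map (fun p => (p.1, p.2.1))).Nodup) :
    ∀ p ∈ l, l.find? (fun q => (q.1, q.2.1) == (p.1, p.2.1)) = some p := by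
  induction l with
  | nil => intro p hp; cases hp
  | cons a t ih =>
    intro p hp
    simp only [List.map_cons, List.nodup_cons] at h
    rcases List.mem_cons.mp hp with rfl | hpt
    · simp [List.find?]
    · have hne : ((a.1, a.2.1) == (p.1, p.2.1)) = false := by
        apply beq_false_of_ne
        intro heq
        exact h.1 (heq ▸ List.mem_map_of_mem hpt)
      simp [List.find?, hne]
      exact ih h.2 p hpt

theorem pvLookup_eq (D : List (Int × Int × Int))
    (h : (D.map (fun p => (p.1, p.2.1))).Nodup) :
    ∀ p ∈ D, pvLookupA D (p.1, p.2.1) = p.2.2 := by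
  intro p hp
  unfold pvLookupA
  rw [pvFind_eq D h p hp]
  rfl

theorem pv_ofList_append_singleton {α : Type} [BEq α] (xs : List α) (x : α) :
    PySem.Set.ofList (xs ++ [x]) = PySem.Set.add (PySem.Set.ofList xs) x := by
  simp [PySem.Set.ofList_eq_foldl]

theorem pv_filter_nil_of_not_mem (l : List (Int × Int × Int)) (d : Int)
    (h : d ∉ l.map (fun p => p.2.2)) :
    l.filter (fun p => p.2.2 == d) = [] := by
  rw [List.filter_eq_nil_iff]
  intro p hp hbeq
  exact h ((eq_of_beq hbeq) ▸ List.mem_map_of_mem hp)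

theorem pvStep_items_mem (V : List Int) (F : Int → PySem.Set (Int × Int))
    (p : Int × Int × Int) (hVnd : V.Nodup) (hmem : p.2.2 ∈ V) :
    (pvStep (PySem.Dict.mk (V.map (fun d => (d, F d)))) p).items =
      V.map (fun d => (d, if d = p.2.2
                          then PySem.Set.add (F p.2.2) (p.1, p.2.1) else F d)) := by
  have hkeys : (PySem.Dict.mk (V.map (fun d => (d, F d)))).keys = V := by
    simp [PySem.Dict.keys, Function.comp_def]
  have hcont : (PySem.Dict.mk (V.map (fun d => (d, F d)))).contains p.2.2 = true := by
    rw [PySem.Dict.contains_iff_mem_keys, hkeys]; exact hmem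
  have hitem : (p.2.2, F p.2.2) ∈ (PySem.Dict.mk (V.map (fun d => (d, F d)))).items :=
    List.mem_map_of_mem hmem
  have hgetD : (PySem.Dict.mk (V.map (fun d => (d, F d)))).getD p.2.2 PySem.Set.empty
      = F p.2.2 :=
    PySem.Dict.getD_of_mem_items _ hitem (by rw [hkeys]; exact hVnd) _
  simp only [pvStep, hcont, if_true, hgetD]
  rw [PySem.Dict.items_insert_of_contains _ _ hcont]
  show (V.map (fun d => (d, F d))).map _ = _
  rw [List.map_map]
  apply List.map_congr_left
  intro d hd
  by_cases hdd : d = p.2.2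
  · subst hdd; simp; rfl
  · simp [hdd]

theorem pvStep_items_notmem (V : List Int) (F : Int → PySem.Set (Int × Int))
    (p : Int × Int × Int) (hmem : p.2.2 ∉ V) :
    (pvStep (PySem.Dict.mk (V.map (fun d => (d, F d)))) p).items =
      V.map (fun d => (d, F d)) ++ [(p.2.2, [(p.1, p.2.1)])] := by
  have hkeys : (PySem.Dict.mk (V.map (fun d => (d, F d)))).keys = V := by
    simp [PySem.Dict.keys, Function.comp_def]
  have hcont : (PySem.Dict.mk (V.map (fun d => (d, F d)))).contains p.2.2 = false := by
    rw [← Bool.not_eq_true, PySem.Dict.contains_iff_mem_keys, hkeys]; exact hmem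
  simp only [pvStep, hcont, Bool.false_eq_true, if_false, PySem.Dict.getD_insert_self]
  rw [PySem.Dict.items_insert_of_contains _ _ (PySem.Dict.contains_insert_self _ _ _)]
  rw [PySem.Dict.items_insert_of_not_contains _ _ hcont]
  rw [List.map_append]
  have hrepl : ∀ q ∈ V.map (fun d => (d, F d)),
      (if q.1 == p.2.2
       then (p.2.2, PySem.Set.union PySem.Set.empty (PySem.Set.ofList [(p.1, p.2.1)]))
       else q) = q := by
    intro q hq
    have hq1 : q.1 ∈ V := by
      rcases List.mem_map.mp hq with ⟨d, hd, rfl⟩; exact hd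
    simp [beq_false_of_ne (fun h : q.1 = p.2.2 => hmem (h ▸ hq1))]
  rw [List.map_congr_left hrepl, List.map_id']
  simp
  rfl

theorem pv_inv (l : List (Int × Int × Int)) :
    (l.foldl pvStep PySem.Dict.empty).items =
      (PySem.Set.ofList (l.map (fun p => p.2.2))).map
        (fun d => (d, PySem.Set.ofList
                        ((l.filter (fun p => p.2.2 == d)).map (fun p => (p.1, p.2.1))))) := by
  induction l using List.reverseRecOn with
  | nil => rfl
  | append_singleton l p ih =>
    rw [List.foldl_append, List.foldl_cons, List.foldl_nil]
    have hE : l.foldl pvStep PySem.Dict.empty =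
        PySem.Dict.mk ((PySem.Set.ofList (l.map (fun p => p.2.2))).map
          (fun d => (d, PySem.Set.ofList
                        ((l.filter (fun p => p.2.2 == d)).map (fun p => (p.1, p.2.1)))))) := by
      apply PySem.Dict.ext; exact ih
    rw [hE]
    have hmapval : (l ++ [p]).map (fun p => p.2.2) = l.map (fun p => p.2.2) ++ [p.2.2] := by
      simp
    have hfilter : ∀ d, (l ++ [p]).filter (fun p => p.2.2 == d) =
        l.filter (fun p => p.2.2 == d) ++ (if p.2.2 == d then [p] else []) := by
      intro d; rw [List.filter_append]; cases h : (p.2.2 == d) <;> simp [List.filter, h]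
    by_cases hmem : p.2.2 ∈ PySem.Set.ofList (l.map (fun p => p.2.2))
    · -- distance seen before: its bucket gains the new vertex, the key list is unchanged
      rw [pvStep_items_mem _ _ _ (PySem.Set.nodup_ofList _) hmem]
      rw [hmapval, pv_ofList_append_singleton, PySem.Set.add_of_mem hmem]
      apply List.map_congr_left
      intro d hd
      by_cases hdd : d = p.2.2
      · subst hdd
        rw [hfilter p.2.2, if_pos BEq.rfl, List.map_append, List.map_cons, List.map_nil,
            pv_ofList_append_singleton]
        simp [PySem.Set.add]
      · have hne : (p.2.2 == d) = false := beq_false_of_ne (fun h => hdd h.symm)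
        rw [hfilter d, hne]
        simp [hdd]
    · -- new distance: a fresh singleton bucket is appended at the end
      rw [pvStep_items_notmem _ _ _ hmem]
      rw [hmapval, pv_ofList_append_singleton, PySem.Set.add_of_not_mem hmem, List.map_append]
      have hnotval : p.2.2 ∉ l.map (fun p => p.2.2) := by
        intro h; apply hmem; rw [PySem.Set.mem_ofList]; exact h
      congr 1
      · apply List.map_congr_left
        intro d hd
        have hne : (p.2.2 == d) = false :=
          beq_false_of_ne (fun h => hmem (h ▸ hd))
        rw [hfilter d, hne]
        simp
      · rw [List.map_cons, List.map_nil, hfilter p.2.2, if_pos BEq.rfl,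
            pv_filter_nil_of_not_mem l p.2.2 hnotval]
        rfl

-- ===== VERDICT (by name: the statement is the Claim_ definition above) =====
theorem distance_vertices_spec : Claim_equal_distance_vertices := by
  intro D _ hpre
  unfold Spec_distance_vertices distance_vertices distance_vertices_alt
  have hfold : D.foldl
      (fun (E : PySem.Dict Int (PySem.Set (Int × Int))) p =>
        let d := pvLookupA D (p.1, p.2.1)
        let E' := if E.contains d then E else E.insert d PySem.Set.empty
        E'.insert d (PySem.Set.union (E'.getD d PySem.Set.empty)
                      (PySem.Set.ofList [(p.1, p.2.1)])))
      PySem.Dict.empty = D.foldl pvStep PySem.Dict.empty := by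
    apply PySem.List.foldl_congr_mem
    intro acc p hp
    simp only [pvStep, pvLookup_eq D hpre p hp]
  rw [hfold, pv_inv D]
  simp
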